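-- pv_equiv track=rewrite | github.com/seregablog/cryptopals | cryptopals/Set3/Challenge23/S3CH23.py | revertLeft
-- ===== SOURCE A (Python) =====
-- BITS_LENGTH = 32
--
-- def intToBits(x) -> list:
--     bits = [0] * BITS_LENGTH
--     i = 0
--     while x > 0:
--         bits[i] = x % 2
--         x = x >> 1
--         i += 1
--     return bits
--
-- def bitsToInt(bits) -> int:
--     x = 0
--     bits.reverse()
--     for b in bits:
--         x = (x << 1) ^ b
--     return x
--
-- def revertLeft(x, k, m) -> int:
--     xBits = intToBits(x)
--     mBits = intToBits(m)
--     yBits = [0] * BITS_LENGTH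
--
--     for i in range(k):
--         yBits[i] = xBits[i]
--
--     for i in range(k, BITS_LENGTH):
--         yBits[i] = xBits[i] ^ yBits[i - k] & mBits[i]
--
--     return bitsToInt(yBits)
-- ===== SOURCE B (Python) =====
-- BITS_LENGTH = 32
--
--
-- def revertLeft(x, k, m) -> int:
--     # Word-level inverse of the MT19937 left temper: iterate the whole-word
--     # recurrence y = x ^ ((y << k) & m); each pass fixes k more low bits,
--     # so BITS_LENGTH passes reach the fixed point.
--     mask = (1 << BITS_LENGTH) - 1
--     x &= mask
--     m &= mask
--     y = x
--     for _ in range(BITS_LENGTH):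
--         y = x ^ ((y << k) & m)
--     return y
-- ===== Notes on version B (the rewrite author's own statement) =====
-- stated objective: idiomatic
-- what changed: Replaces the bit-list machinery (intToBits/bitsToInt and two index loops over 32-entry lists) by whole-word bit arithmetic: iterate y = x ^ ((y << k) & m) BITS_LENGTH times on masked 32-bit integers, which realises the same bit recurrence via word shifts.
-- outside the precondition, e.g. on revertLeft(-1, 7, 3): A returns 0, B returns 4294967295; on revertLeft(3, 2, -4): A returns 3, B returns 4294967295
import Mathlib
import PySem

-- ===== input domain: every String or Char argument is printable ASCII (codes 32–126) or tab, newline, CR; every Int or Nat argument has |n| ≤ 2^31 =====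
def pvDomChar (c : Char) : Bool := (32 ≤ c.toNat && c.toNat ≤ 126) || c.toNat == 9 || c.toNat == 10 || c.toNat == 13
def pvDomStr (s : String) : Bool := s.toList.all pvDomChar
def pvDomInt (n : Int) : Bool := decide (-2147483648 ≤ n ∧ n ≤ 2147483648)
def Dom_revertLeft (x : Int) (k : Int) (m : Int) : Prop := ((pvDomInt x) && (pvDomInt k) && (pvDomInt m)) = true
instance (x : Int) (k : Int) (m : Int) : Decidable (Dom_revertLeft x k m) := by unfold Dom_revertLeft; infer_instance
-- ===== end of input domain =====

-- B replaces A's bit-list machinery by whole-word bit arithmetic (iterate y = x ^ ((y << k) & m)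
-- 32 times on masked words): an idiomatic word-level inverse of the MT19937 left temper.

-- ===== PORT A =====
-- while x > 0: bits[i] = x % 2; x = x >> 1; i += 1
def intToBitsLoop (bits : List Int) (x : Int) (i : Int) : List Int :=
  if 0 < x then
    intToBitsLoop (PySem.List.pySetD bits i (PySem.Int.mod x 2)) (x >>> (1 : Nat)) (i + 1)
  else bits
termination_by x.toNat
decreasing_by
  simp only [Int.shiftRight_eq_div_pow, pow_one]
  omega

def intToBits (x : Int) : List Int := intToBitsLoop (List.replicate 32 0) x 0

def bitsToInt (bits : List Int) : Int :=
  bits.reverse.foldl (fun a b => PySem.Int.bxor (a <<< (1 : Nat)) b) 0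

def revertLeft (x : Int) (k : Int) (m : Int) : Int :=
  let xBits := intToBits x
  let mBits := intToBits m
  let yBits0 : List Int := List.replicate 32 0
  let yBits1 := (PySem.List.pyRange 0 k 1).foldl
    (fun ys i => PySem.List.pySetD ys i (PySem.List.pyGetD xBits i 0)) yBits0
  let yBits2 := (PySem.List.pyRange k 32 1).foldl
    (fun ys i => PySem.List.pySetD ys i
      (PySem.Int.bxor (PySem.List.pyGetD xBits i 0)
        (PySem.Int.band (PySem.List.pyGetD ys (i - k) 0) (PySem.List.pyGetD mBits i 0)))) yBits1
  bitsToInt yBits2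

-- ===== PORT B =====
def revertLeft_alt (x : Int) (k : Int) (m : Int) : Int :=
  let mask : Int := ((1 : Int) <<< (32 : Nat)) - 1
  let x' := PySem.Int.band x mask
  let m' := PySem.Int.band m mask
  (PySem.List.pyRange 0 32 1).foldl
    (fun y _ => PySem.Int.bxor x' (PySem.Int.band (y <<< k.toNat) m')) x'

-- ===== PRECONDITION & SPEC =====
-- Pre_ restricts to the natural domain of the MT19937 untemper: nonnegative words and a shift
-- count 0..32.  Outside it A raises IndexError (k < 0 or k > 32) or returns accidental values
-- (negative x or m are treated by intToBits as having no bits at all, i.e. as 0), while B's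
-- word-level code would raise (k < 0) or use the two's-complement word (negative x or m).
def Pre_revertLeft (x : Int) (k : Int) (m : Int) : Prop :=
  0 ≤ x ∧ 0 ≤ m ∧ 0 ≤ k ∧ k ≤ 32
instance (x : Int) (k : Int) (m : Int) : Decidable (Pre_revertLeft x k m) := by
  unfold Pre_revertLeft; infer_instance

def pvWitness_revertLeft : Int × Int × Int := (7, 3, 5)

def Spec_revertLeft (x : Int) (k : Int) (m : Int) (out : Int) : Prop := out = revertLeft_alt x k m
instance (x : Int) (k : Int) (m : Int) (out : Int) : Decidable (Spec_revertLeft x k m out) := by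
  unfold Spec_revertLeft; infer_instance

-- ===== CLAIM (what is proved, stated in full; the proofs are below) =====
def Claim_equal_revertLeft : Prop := ∀ (x : Int) (k : Int) (m : Int),
  Dom_revertLeft x k m → Pre_revertLeft x k m → Spec_revertLeft x k m (revertLeft x k m)

-- ===== LEMMAS AND PROOFS =====

-- the ideal untempered word, bit by bit: y[i] = x[i] ^ (y[i-k] & m[i]), with y[i] = x[i] below k
-- (and for k = 0, where A's read of yBits[i] sees the still-zero cell, so y[i] = x[i] as well)
def fbit (K X M : Nat) : Nat → Bool
  | i =>
    if _ : 0 < K ∧ K ≤ i then (X.testBit i).xor (fbit K X M (i - K) && M.testBit i)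
    else X.testBit i
termination_by i => i
decreasing_by omega

-- the number with bits g 0, g 1, …, g (n-1)
def ofb (g : Nat → Bool) : Nat → Nat
  | 0 => 0
  | n + 1 => Nat.bit (g 0) (ofb (fun i => g (i + 1)) n)

def bitI (b : Bool) : Int := if b then 1 else 0

theorem ofb_testBit (g : Nat → Bool) (n : Nat) (i : Nat) :
    (ofb g n).testBit i = if i < n then g i else false := by
  induction n generalizing g i with
  | zero => simp [ofb]
  | succ n ih =>
    cases i with
    | zero => simp [ofb]
    | succ i =>
      rw [show (ofb g (n+1)) = Nat.bit (g 0) (ofb (fun j => g (j+1)) n) from rfl,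
          Nat.testBit_bit_succ, ih]
      by_cases h : i < n <;> simp [h]

theorem ofb_succ_right (g : Nat → Bool) (n : Nat) :
    ofb g (n + 1) = ofb g n + (g n).toNat * 2 ^ n := by
  induction n generalizing g with
  | zero => simp [ofb, Nat.bit]; cases g 0 <;> simp
  | succ n ih =>
    show Nat.bit (g 0) (ofb (fun i => g (i+1)) (n+1)) = Nat.bit (g 0) (ofb (fun i => g (i+1)) n) + _
    rw [ih]
    cases g 0 <;> simp [Nat.bit] <;> ring

theorem ofb_lt (g : Nat → Bool) (n : Nat) : ofb g n < 2 ^ n := by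
  induction n generalizing g with
  | zero => simp [ofb]
  | succ n ih =>
    have := ih (fun i => g (i+1))
    cases h : g 0 <;> simp [ofb, h, Nat.bit] <;> omega

theorem Y_testBit (K X M : Nat) (i : Nat) :
    (ofb (fbit K X M) 32).testBit i = if i < 32 then fbit K X M i else false :=
  ofb_testBit _ 32 i

-- the ideal word is a fixed point of the word-level step (for 1 ≤ k)
theorem Y_fixed (K X M : Nat) (hK : 0 < K) (hX : X < 2^32) (hM : M < 2^32) :
    X ^^^ (((ofb (fbit K X M) 32) <<< K) &&& M) = ofb (fbit K X M) 32 := by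
  apply Nat.eq_of_testBit_eq
  intro i
  rw [Nat.testBit_xor, Nat.testBit_and, Nat.testBit_shiftLeft]
  simp only [Y_testBit]
  by_cases h32 : i < 32
  · rw [if_pos h32]
    by_cases hki : K ≤ i
    · rw [if_pos (show i - K < 32 by omega)]
      conv_rhs => rw [fbit]
      rw [dif_pos ⟨hK, hki⟩]
      simp [hki]
    · conv_rhs => rw [fbit]
      rw [dif_neg (by omega)]
      simp [hki]
  · rw [if_neg h32]
    have hx : X.testBit i = false :=
      Nat.testBit_lt_two_pow (lt_of_lt_of_le hX (Nat.pow_le_pow_right (by norm_num) (by omega)))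
    have hm : M.testBit i = false :=
      Nat.testBit_lt_two_pow (lt_of_lt_of_le hM (Nat.pow_le_pow_right (by norm_num) (by omega)))
    simp [hx, hm]

def bstep (K X M : Nat) (y : Nat) : Nat := X ^^^ ((y <<< K) &&& M)

-- each word-level pass zeroes at least one more low bit of the distance to the fixed point
theorem bstep_converges (K X M : Nat) (hK : 0 < K) (hX : X < 2^32) (hM : M < 2^32) (t : Nat) :
    ((bstep K X M)^[t] X) ^^^ (ofb (fbit K X M) 32) < 2^32 ∧
    ∀ i, i < t → (((bstep K X M)^[t] X) ^^^ (ofb (fbit K X M) 32)).testBit i = false := by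
  induction t with
  | zero =>
    refine ⟨Nat.xor_lt_two_pow hX (ofb_lt _ 32), by omega⟩
  | succ t ih =>
    have key : ((bstep K X M)^[t+1] X) ^^^ (ofb (fbit K X M) 32)
        = ((((bstep K X M)^[t] X) ^^^ (ofb (fbit K X M) 32)) <<< K) &&& M := by
      apply Nat.eq_of_testBit_eq
      intro i
      rw [Function.iterate_succ_apply']
      conv_lhs => rw [show ofb (fbit K X M) 32 = X ^^^ (((ofb (fbit K X M) 32) <<< K) &&& M) from
        (Y_fixed K X M hK hX hM).symm]
      simp only [bstep, Nat.testBit_xor, Nat.testBit_and, Nat.testBit_shiftLeft]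
      cases X.testBit i <;> cases hd : (decide (K ≤ i)) <;>
        cases ((bstep K X M)^[t] X).testBit (i - K) <;>
        cases (ofb (fbit K X M) 32).testBit (i - K) <;> cases M.testBit i <;> simp
    constructor
    · rw [key]; exact lt_of_le_of_lt Nat.and_le_right hM
    · intro i hi
      rw [key, Nat.testBit_and, Nat.testBit_shiftLeft]
      by_cases hik : K ≤ i
      · rw [(ih.2 (i - K) (by omega) : _)]; simp
      · simp [hik]

theorem bstep_32 (K X M : Nat) (hK : 0 < K) (hX : X < 2^32) (hM : M < 2^32) :
    (bstep K X M)^[32] X = ofb (fbit K X M) 32 := by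
  have h := bstep_converges K X M hK hX hM 32
  have hz : ((bstep K X M)^[32] X) ^^^ (ofb (fbit K X M) 32) = 0 := by
    apply Nat.eq_of_testBit_eq
    intro i
    rw [Nat.zero_testBit]
    by_cases hi : i < 32
    · exact h.2 i hi
    · exact Nat.testBit_lt_two_pow
        (lt_of_lt_of_le h.1 (Nat.pow_le_pow_right (by norm_num) (by omega)))
  exact Nat.xor_eq_zero_iff.mp hz

-- k = 0: the word-level step oscillates with period 2 from x, so 32 passes return x
theorem bstep0_32 (X M : Nat) : (bstep 0 X M)^[32] X = X := by
  have h2 : (bstep 0 X M)^[2] X = X := by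
    show bstep 0 X M (bstep 0 X M X) = X
    simp only [bstep, Nat.shiftLeft_zero]
    rw [Nat.and_xor_distrib_right, Nat.and_assoc, Nat.and_self, Nat.xor_self, Nat.xor_zero]
  rw [show (32:Nat) = 2 * 16 from rfl, Function.iterate_mul]
  exact Function.iterate_fixed h2 16

theorem ofb_fbit_zero (X M : Nat) (hX : X < 2^32) : ofb (fbit 0 X M) 32 = X := by
  apply Nat.eq_of_testBit_eq
  intro i
  rw [ofb_testBit]
  by_cases hi : i < 32
  · rw [if_pos hi, fbit, dif_neg (by omega)]
  · rw [if_neg hi,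
        (Nat.testBit_lt_two_pow (lt_of_lt_of_le hX (Nat.pow_le_pow_right (by norm_num) (by omega))) : X.testBit i = false)]

-- ---------- A side ----------

theorem getD_set_ne (xs : List Int) (i j : Nat) (v d : Int) (h : i ≠ j) :
    (xs.set i v).getD j d = xs.getD j d := by
  simp [List.getD, List.getElem?_set_ne h]

theorem getD_set_self (xs : List Int) (i : Nat) (v d : Int) (h : i < xs.length) :
    (xs.set i v).getD i d = v := by
  simp [List.getD, h]

theorem intToBitsLoop_spec (n : Nat) : ∀ (x : Int) (i : Nat) (bits : List Int),
    x.toNat = n → 0 ≤ x → bits.length = 32 → x.toNat < 2^(32-i) → i ≤ 32 →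
    (∀ j, i ≤ j → j < 32 → bits.getD j 0 = 0) →
    (intToBitsLoop bits x (i : Int)).length = 32 ∧
    ∀ j, j < 32 → (intToBitsLoop bits x (i : Int)).getD j 0 =
      if j < i then bits.getD j 0 else bitI (x.toNat.testBit (j - i)) := by
  induction n using Nat.strong_induction_on with
  | _ n ih =>
    intro x i bits hn hx hlen hlt hi32 hhigh
    rw [intToBitsLoop]
    by_cases hpos : 0 < x
    · rw [if_pos hpos]
      have hi : i < 32 := by
        by_contra hc
        have : (32:Nat) - i = 0 := by omega
        rw [this] at hlt
        omega
      have hset : PySem.List.pySetD bits (i:Int) (PySem.Int.mod x 2)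
          = bits.set i (PySem.Int.mod x 2) := by simp
      have hmod : PySem.Int.mod x 2 = ((x.toNat % 2 : Nat) : Int) := by
        rw [show x = ((x.toNat : Nat) : Int) by omega]; simp
      have hshift : (x >>> (1:Nat)).toNat = x.toNat / 2 := by
        rw [Int.shiftRight_eq_div_pow]; omega
      have hshiftnn : 0 ≤ x >>> (1:Nat) := by
        rw [Int.shiftRight_eq_div_pow]; positivity
      have hcast : ((i:Int) + 1) = (((i+1 : Nat)) : Int) := by push_cast; ring
      rw [hset, hcast]
      have hrec := ih (x.toNat / 2) (by omega) (x >>> (1:Nat)) (i+1)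
        (bits.set i (PySem.Int.mod x 2)) (by omega) hshiftnn (by simp [hlen])
        (by
          rw [hshift]
          have : (2:Nat)^(32-i) = 2 * 2^(32-(i+1)) := by
            rw [← pow_succ']
            congr 1
            omega
          omega)
        (by omega)
        (by
          intro j hj1 hj2
          rw [getD_set_ne _ _ _ _ _ (by omega)]
          exact hhigh j (by omega) hj2)
      refine ⟨hrec.1, ?_⟩
      intro j hj
      rw [hrec.2 j hj]
      by_cases hji : j < i
      · rw [if_pos (by omega), if_pos hji, getD_set_ne _ _ _ _ _ (by omega)]
      · by_cases hje : j = i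
        · subst hje
          rw [if_pos (by omega), if_neg (by omega)]
          rw [getD_set_self _ _ _ _ (by omega), hmod]
          rw [show j - j = 0 from by omega, Nat.testBit_zero]
          rcases Nat.mod_two_eq_zero_or_one x.toNat with h2 | h2 <;> simp [h2, bitI]
        · rw [if_neg (by omega), if_neg (by omega), hshift]
          rw [show j - i = (j - (i+1)) + 1 from by omega, Nat.testBit_succ]
    · rw [if_neg hpos]
      have hz : x.toNat = 0 := by omega
      refine ⟨hlen, ?_⟩
      intro j hj
      by_cases hji : j < i
      · rw [if_pos hji]
      · rw [if_neg hji, hz, Nat.zero_testBit, hhigh j (by omega) hj]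
        rfl

theorem intToBits_spec (x : Int) (hx : 0 ≤ x) (hlt : x.toNat < 2^32) :
    (intToBits x).length = 32 ∧
    ∀ j, j < 32 → (intToBits x).getD j 0 = bitI (x.toNat.testBit j) := by
  have h := intToBitsLoop_spec x.toNat x 0 (List.replicate 32 0) rfl hx (by simp)
    (by simpa using hlt) (by omega)
    (by intro j _ hj; exact List.getD_replicate (x := (0:Int)) hj)
  refine ⟨by simpa using h.1, ?_⟩
  intro j hj
  have := h.2 j hj
  simpa using this

-- first loop: copy xs[i] into ys[i] for i in range(a, b)
theorem loop1_spec (xs : List Int) : ∀ (nsteps : Nat) (a b : Int) (ys : List Int),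
    (b - a).toNat = nsteps → 0 ≤ a → b ≤ 32 → ys.length = 32 →
    ((PySem.List.pyRange a b 1).foldl
       (fun ys i => PySem.List.pySetD ys i (PySem.List.pyGetD xs i 0)) ys).length = 32 ∧
    ∀ j, j < 32 → ((PySem.List.pyRange a b 1).foldl
       (fun ys i => PySem.List.pySetD ys i (PySem.List.pyGetD xs i 0)) ys).getD j 0 =
      if a ≤ (j:Int) ∧ (j:Int) < b then PySem.List.pyGetD xs (j:Int) 0 else ys.getD j 0 := by
  intro nsteps
  induction nsteps with
  | zero =>
    intro a b ys hn ha hb hlen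
    rw [PySem.List.pyRange_one_eq_nil (by omega)]
    refine ⟨hlen, ?_⟩
    intro j hj
    simp only [List.foldl_nil]
    rw [if_neg (by omega)]
  | succ n ihn =>
    intro a b ys hn ha hb hlen
    rw [PySem.List.pyRange_one_cons (by omega), List.foldl_cons]
    have hset : PySem.List.pySetD ys a (PySem.List.pyGetD xs a 0)
        = ys.set a.toNat (PySem.List.pyGetD xs a 0) := by
      exact PySem.List.pySetD_of_nonneg _ _ ha
    have hrec := ihn (a+1) b (PySem.List.pySetD ys a (PySem.List.pyGetD xs a 0))
      (by omega) (by omega) hb (by rw [hset]; simp [hlen])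
    refine ⟨hrec.1, ?_⟩
    intro j hj
    rw [hrec.2 j hj, hset]
    by_cases hja : (j:Int) = a
    · rw [if_neg (by omega), if_pos (by omega)]
      rw [show a.toNat = j from by omega, getD_set_self _ _ _ _ (by omega)]
      rw [show ((j:Nat):Int) = a from hja]
    · by_cases hjr : a + 1 ≤ (j:Int) ∧ (j:Int) < b
      · rw [if_pos hjr, if_pos (by omega)]
      · rw [if_neg hjr, if_neg (by omega), getD_set_ne _ _ _ _ _ (by omega)]

-- bit-level step value
theorem step_value (a b c : Bool) :
    PySem.Int.bxor (bitI a) (PySem.Int.band (bitI b) (bitI c)) = bitI (a.xor (b && c)) := by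
  cases a <;> cases b <;> cases c <;> decide

-- second loop: the recurrence, by induction down from c to 32
theorem loop2_spec (K X M : Nat) (xs ms : List Int)
    (hx : ∀ j, j < 32 → xs.getD j 0 = bitI (X.testBit j))
    (hm : ∀ j, j < 32 → ms.getD j 0 = bitI (M.testBit j)) :
    ∀ (nsteps : Nat) (c : Nat) (ys : List Int), 32 - c = nsteps → K ≤ c → c ≤ 32 →
    ys.length = 32 →
    (∀ j, j < 32 → ys.getD j 0 = if j < c then bitI (fbit K X M j) else 0) →
    ((PySem.List.pyRange (c:Int) 32 1).foldl
      (fun ys i => PySem.List.pySetD ys i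
        (PySem.Int.bxor (PySem.List.pyGetD xs i 0)
          (PySem.Int.band (PySem.List.pyGetD ys (i - (K:Int)) 0) (PySem.List.pyGetD ms i 0))))
      ys).length = 32 ∧
    ∀ j, j < 32 → ((PySem.List.pyRange (c:Int) 32 1).foldl
      (fun ys i => PySem.List.pySetD ys i
        (PySem.Int.bxor (PySem.List.pyGetD xs i 0)
          (PySem.Int.band (PySem.List.pyGetD ys (i - (K:Int)) 0) (PySem.List.pyGetD ms i 0))))
      ys).getD j 0 = bitI (fbit K X M j) := by
  intro nsteps
  induction nsteps with
  | zero =>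
    intro c ys hn hKc hc32 hlen hinv
    rw [PySem.List.pyRange_one_eq_nil (by exact_mod_cast Int.ofNat_le.mpr (by omega))]
    simp only [List.foldl_nil]
    refine ⟨hlen, ?_⟩
    intro j hj
    rw [hinv j hj, if_pos (by omega)]
  | succ n ihn =>
    intro c ys hn hKc hc32 hlen hinv
    rw [PySem.List.pyRange_one_cons (by exact_mod_cast Int.ofNat_lt.mpr (by omega)), List.foldl_cons]
    have hread : PySem.List.pyGetD ys ((c:Int) - (K:Int)) 0 = bitI (if 0 < K then fbit K X M (c - K) else false) := by
      rw [show ((c:Int) - (K:Int)) = (((c - K : Nat)) : Int) from by push_cast [Nat.cast_sub hKc]; ring,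
          PySem.List.pyGetD_natCast, hinv (c - K) (by omega)]
      by_cases hK : 0 < K
      · rw [if_pos (by omega), if_pos hK]
      · rw [if_neg (by omega), if_neg hK]
        rfl
    have hval : PySem.Int.bxor (PySem.List.pyGetD xs (c:Int) 0)
        (PySem.Int.band (PySem.List.pyGetD ys ((c:Int) - (K:Int)) 0) (PySem.List.pyGetD ms (c:Int) 0))
        = bitI (fbit K X M c) := by
      rw [hread, PySem.List.pyGetD_natCast, PySem.List.pyGetD_natCast,
          hx c (by omega), hm c (by omega), step_value]
      congr 1
      by_cases hK : 0 < K
      · rw [if_pos hK]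
        conv_rhs => rw [fbit]
        rw [dif_pos (⟨hK, hKc⟩ : 0 < K ∧ K ≤ c)]
      · rw [if_neg hK]
        conv_rhs => rw [fbit]
        rw [dif_neg (by omega)]
        simp
    rw [hval]
    have hset : PySem.List.pySetD ys (c:Int) (bitI (fbit K X M c)) = ys.set c (bitI (fbit K X M c)) := by
      simp
    rw [hset, show ((c:Int) + 1) = (((c + 1 : Nat)) : Int) from by push_cast; ring]
    exact ihn (c+1) _ (by omega) (by omega) (by omega) (by simp [hlen])
      (by
        intro j' hj'
        by_cases hjc : j' = c
        · subst hjc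
          rw [getD_set_self _ _ _ _ (by omega), if_pos (by omega)]
        · rw [getD_set_ne _ _ _ _ _ (Ne.symm hjc), hinv j' hj']
          by_cases h1 : j' < c
          · rw [if_pos h1, if_pos (by omega)]
          · rw [if_neg h1, if_neg (by omega)])

-- Horner fold of the reversed bit list
theorem horner (g : Nat → Bool) : ∀ (n : Nat) (acc : Int), 0 ≤ acc →
    ((List.range n).map (fun j => bitI (g j))).reverse.foldl
      (fun a b => PySem.Int.bxor (a <<< (1 : Nat)) b) acc
    = acc * 2^n + ((ofb g n : Nat) : Int) := by
  intro n
  induction n with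
  | zero => intro acc _; simp [ofb]
  | succ n ihn =>
    intro acc hacc
    rw [List.range_succ, List.map_append, List.reverse_append]
    simp only [List.map_cons, List.map_nil, List.reverse_cons, List.reverse_nil,
      List.nil_append, List.singleton_append, List.foldl_cons]
    have hstep : PySem.Int.bxor (acc <<< (1:Nat)) (bitI (g n)) = 2*acc + bitI (g n) := by
      cases hgn : g n
      · show PySem.Int.bxor (acc <<< (1:Nat)) 0 = 2*acc + 0
        simp [Int.shiftLeft_eq]; ring
      · show PySem.Int.bxor (acc <<< (1:Nat)) 1 = 2*acc + 1
        obtain ⟨a, rfl⟩ : ∃ a : Nat, acc = (a : Int) := ⟨acc.toNat, by omega⟩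
        rw [show ((a:Int) <<< (1:Nat)) = ((a <<< 1 : Nat) : Int) from by
              simp [Int.shiftLeft_eq, Nat.shiftLeft_eq],
            show (1:Int) = ((1:Nat):Int) from rfl, PySem.Int.bxor_natCast,
            Nat.shiftLeft_eq, Nat.xor_one_of_even (by simp)]
        push_cast; ring
    rw [hstep, ihn (2*acc + bitI (g n)) (by cases g n <;> simp [bitI] <;> omega)]
    rw [ofb_succ_right]
    push_cast
    cases g n <;> simp [bitI] <;> ring

theorem bitsToInt_spec (g : Nat → Bool) (L : List Int) (hlen : L.length = 32)
    (hL : ∀ j, j < 32 → L.getD j 0 = bitI (g j)) :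
    bitsToInt L = ((ofb g 32 : Nat) : Int) := by
  have hLeq : L = (List.range 32).map (fun j => bitI (g j)) := by
    apply List.ext_getElem (by simp [hlen])
    intro j h1 h2
    have := hL j (by omega)
    simp only [List.getD] at this
    rw [List.getElem?_eq_getElem h1] at this
    simp at this
    simp [this]
  rw [bitsToInt, hLeq, horner g 32 0 le_rfl]
  simp

-- ---------- assembly ----------

theorem foldl_const_iterate (l : List Int) (f : Int → Int) (a : Int) :
    l.foldl (fun y _ => f y) a = f^[l.length] a := by
  induction l generalizing a <;> simp_all [Function.iterate_succ_apply]

theorem int_bstep_cast (K X' M' : Nat) (n : Nat) :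
    PySem.Int.bxor ((X' : Int)) (PySem.Int.band (((n : Int)) <<< K) ((M' : Int)))
      = ((bstep K X' M' n : Nat) : Int) := by
  rw [show ((n:Int) <<< K) = ((n <<< K : Nat) : Int) from by
        simp [Int.shiftLeft_eq, Nat.shiftLeft_eq]]
  rw [PySem.Int.band_natCast, PySem.Int.bxor_natCast]
  rfl

theorem alt_eq_iterate (x k m : Int) (hx : 0 ≤ x) (hm : 0 ≤ m)
    (hxlt : x.toNat < 2^32) (hmlt : m.toNat < 2^32) :
    revertLeft_alt x k m = (((bstep k.toNat x.toNat m.toNat)^[32] x.toNat : Nat) : Int) := by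
  unfold revertLeft_alt
  have hmask : ((1 : Int) <<< (32 : Nat)) - 1 = (((2^32 - 1 : Nat)) : Int) := by decide
  have hbx : PySem.Int.band x (((1 : Int) <<< (32 : Nat)) - 1) = ((x.toNat : Nat) : Int) := by
    rw [hmask, show x = ((x.toNat : Nat) : Int) from by omega, PySem.Int.band_natCast,
        Nat.and_two_pow_sub_one_eq_mod]
    congr 1
    omega
  have hbm : PySem.Int.band m (((1 : Int) <<< (32 : Nat)) - 1) = ((m.toNat : Nat) : Int) := by
    rw [hmask, show m = ((m.toNat : Nat) : Int) from by omega, PySem.Int.band_natCast,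
        Nat.and_two_pow_sub_one_eq_mod]
    congr 1
    omega
  simp only [hbx, hbm]
  rw [foldl_const_iterate]
  rw [show (PySem.List.pyRange 0 32 1).length = 32 from by decide]
  generalize x.toNat = X
  generalize m.toNat = M
  induction 32 with
  | zero => rfl
  | succ t iht =>
    rw [Function.iterate_succ_apply', Function.iterate_succ_apply', iht, int_bstep_cast]

theorem a_eq_ofb (x k m : Int) (hx : 0 ≤ x) (hm : 0 ≤ m) (hk0 : 0 ≤ k) (hk32 : k ≤ 32)
    (hxlt : x.toNat < 2^32) (hmlt : m.toNat < 2^32) :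
    revertLeft x k m = ((ofb (fbit k.toNat x.toNat m.toNat) 32 : Nat) : Int) := by
  obtain ⟨hxlen, hxbits⟩ := intToBits_spec x hx hxlt
  obtain ⟨hmlen, hmbits⟩ := intToBits_spec m hm hmlt
  unfold revertLeft
  obtain ⟨h1len, h1get⟩ := loop1_spec (intToBits x) (k - 0).toNat 0 k
    (List.replicate 32 0) rfl le_rfl hk32 (by simp)
  have hkcast : k = ((k.toNat : Nat) : Int) := by omega
  have hinv : ∀ j, j < 32 →
      ((PySem.List.pyRange 0 k 1).foldl
        (fun ys i => PySem.List.pySetD ys i (PySem.List.pyGetD (intToBits x) i 0))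
        (List.replicate 32 0)).getD j 0
      = if j < k.toNat then bitI (fbit k.toNat x.toNat m.toNat j) else 0 := by
    intro j hj
    rw [h1get j hj]
    by_cases hjk : (j:Int) < k
    · rw [if_pos ⟨by omega, hjk⟩, if_pos (by omega), PySem.List.pyGetD_natCast, hxbits j hj]
      congr 1
      rw [fbit, dif_neg (by omega)]
    · rw [if_neg (by omega), if_neg (by omega)]
      exact List.getD_replicate (x := (0:Int)) hj
  obtain ⟨h2len, h2get⟩ := loop2_spec k.toNat x.toNat m.toNat (intToBits x) (intToBits m)
    hxbits hmbits (32 - k.toNat) k.toNat _ rfl le_rfl (by omega) h1len hinv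
  rw [hkcast] at h2len h2get ⊢
  exact bitsToInt_spec _ _ h2len h2get

-- ===== VERDICT (by name: the statement is the Claim_ definition above) =====
theorem revertLeft_spec : Claim_equal_revertLeft := by
  intro x k m hdom hpre
  obtain ⟨hx, hm, hk0, hk32⟩ := hpre
  unfold Dom_revertLeft at hdom
  simp only [pvDomInt, Bool.and_eq_true, decide_eq_true_eq] at hdom
  have hxlt : x.toNat < 2^32 := by omega
  have hmlt : m.toNat < 2^32 := by omega
  unfold Spec_revertLeft
  rw [a_eq_ofb x k m hx hm hk0 hk32 hxlt hmlt,
      alt_eq_iterate x k m hx hm hxlt hmlt]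
  by_cases hK : 0 < k.toNat
  · rw [bstep_32 k.toNat x.toNat m.toNat hK hxlt hmlt]
  · rw [show k.toNat = 0 from by omega, bstep0_32, ofb_fbit_zero x.toNat m.toNat hxlt]
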